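-- pv_equiv track=rewrite | github.com/ali215haider/ML-Based-Automate-Phishing-Detection-System | utils/detection.py | _is_similar_domain
-- ===== SOURCE A (Python) =====
-- def _is_similar_domain(domain1, domain2):
--     """Check if domains are suspiciously similar"""
--     # Simple similarity check - can be enhanced with edit distance
--     domain1_clean = domain1.replace('www.', '').lower()
--     domain2_clean = domain2.replace('www.', '').lower()
--
--     # Check for common substitutions
--     substitutions = {'0': 'o', '1': 'l', '3': 'e', '5': 's', '@': 'a'}
--
--     for orig, sub in substitutions.items():
--         if domain1_clean.replace(orig, sub) == domain2_clean:
--             return True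
--         if domain1_clean.replace(sub, orig) == domain2_clean:
--             return True
--
--     # Check for added/removed characters
--     if len(domain1_clean) == len(domain2_clean) + 1:
--         for i in range(len(domain1_clean)):
--             if domain1_clean[:i] + domain1_clean[i+1:] == domain2_clean:
--                 return True
--
--     return False
-- ===== SOURCE B (Python) =====
-- def _is_similar_domain(domain1, domain2):
--     """Check if domains are suspiciously similar"""
--     d1 = domain1.replace('www.', '').lower()
--     d2 = domain2.replace('www.', '').lower()
--
--     pairs = [('0', 'o'), ('1', 'l'), ('3', 'e'), ('5', 's'), ('@', 'a')]
--
--     if len(d1) == len(d2):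
--         # A whole-string replace of one char by another matches d2 iff every
--         # position agrees after mapping that one character.
--         for a, b in pairs:
--             for x, y in ((a, b), (b, a)):
--                 if all(c2 == (y if c1 == x else c1) for c1, c2 in zip(d1, d2)):
--                     return True
--     elif len(d1) == len(d2) + 1:
--         # two-pointer single-deletion test
--         i = j = 0
--         skipped = False
--         while i < len(d1):
--             if j < len(d2) and d1[i] == d2[j]:
--                 i += 1
--                 j += 1
--             elif not skipped:
--                 skipped = True
--                 i += 1
--             else:
--                 return False
--         return True
--     return False
-- ===== Notes on version B (the rewrite author's own statement) =====
-- stated objective: alternative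
-- what changed: The substitution test becomes a single position-wise pass over the zipped cleaned strings (instead of building five replaced copies of the string and comparing each), and the single-deletion test becomes a greedy two-pointer scan (instead of rebuilding and comparing a candidate string for every deletion index).
import Mathlib
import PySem

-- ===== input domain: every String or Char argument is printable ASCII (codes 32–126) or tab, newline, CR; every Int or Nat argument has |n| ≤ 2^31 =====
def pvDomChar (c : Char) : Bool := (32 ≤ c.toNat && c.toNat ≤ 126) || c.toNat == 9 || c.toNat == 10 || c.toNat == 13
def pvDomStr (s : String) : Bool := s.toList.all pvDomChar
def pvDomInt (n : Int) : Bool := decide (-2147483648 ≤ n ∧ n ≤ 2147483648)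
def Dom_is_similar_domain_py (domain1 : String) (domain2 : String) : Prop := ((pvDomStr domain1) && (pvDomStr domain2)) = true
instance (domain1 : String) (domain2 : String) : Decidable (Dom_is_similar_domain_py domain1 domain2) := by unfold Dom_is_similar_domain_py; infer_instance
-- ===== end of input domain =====

-- B replaces A's five build-a-replaced-copy-and-compare substitution checks by one position-wise
-- pass over the zipped strings, and A's try-every-deletion-index loop by a greedy two-pointer scan.

-- ===== PORT A =====
-- the substitution dict {'0':'o','1':'l','3':'e','5':'s','@':'a'} in insertion order
def pvSubsA : List (Char × Char) := [('0','o'), ('1','l'), ('3','e'), ('5','s'), ('@','a')]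

def is_similar_domain_py (domain1 : String) (domain2 : String) : Bool :=
  let d1 := PySem.Chars.lower (PySem.Chars.replace domain1.toList "www.".toList [])
  let d2 := PySem.Chars.lower (PySem.Chars.replace domain2.toList "www.".toList [])
  -- for orig, sub in substitutions.items(): two replace-and-compare tests, early return True
  if pvSubsA.any (fun p =>
      PySem.Chars.replace d1 [p.1] [p.2] == d2 || PySem.Chars.replace d1 [p.2] [p.1] == d2) then
    true
  else if d1.length == d2.length + 1 then
    -- for i in range(len(domain1_clean)): domain1_clean[:i] + domain1_clean[i+1:] == domain2_clean
    (List.range d1.length).any (fun i =>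
      PySem.Chars.slice d1 none (some (i : Int)) ++ PySem.Chars.slice d1 (some ((i : Int) + 1)) none == d2)
  else
    false

-- ===== PORT B =====
-- all(c2 == (y if c1 == x else c1) for c1, c2 in zip(d1, d2))
def pvSubMatch (x y : Char) (d1 d2 : List Char) : Bool :=
  (d1.zip d2).all (fun cd => cd.2 == (if cd.1 == x then y else cd.1))

-- the greedy two-pointer single-deletion scan (skipped flag, rest of d1, rest of d2)
def pvDelOne : Bool → List Char → List Char → Bool
  | _, [], _ => true
  | skipped, c :: r1, d :: r2 =>
      if c == d then pvDelOne skipped r1 (d :: r2).tail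
      else if !skipped then pvDelOne true r1 (d :: r2)
      else false
  | skipped, _ :: r1, [] =>
      if !skipped then pvDelOne true r1 []
      else false

def is_similar_domain_py_alt (domain1 : String) (domain2 : String) : Bool :=
  let d1 := PySem.Chars.lower (PySem.Chars.replace domain1.toList "www.".toList [])
  let d2 := PySem.Chars.lower (PySem.Chars.replace domain2.toList "www.".toList [])
  if d1.length == d2.length then
    pvSubsA.any (fun p => pvSubMatch p.1 p.2 d1 d2 || pvSubMatch p.2 p.1 d1 d2)
  else if d1.length == d2.length + 1 then
    pvDelOne false d1 d2
  else
    false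

-- ===== PRECONDITION & SPEC =====
def Spec_is_similar_domain_py (domain1 : String) (domain2 : String) (out : Bool) : Prop := out = is_similar_domain_py_alt domain1 domain2
instance (domain1 : String) (domain2 : String) (out : Bool) : Decidable (Spec_is_similar_domain_py domain1 domain2 out) := by unfold Spec_is_similar_domain_py; infer_instance

-- ===== CLAIM (what is proved, stated in full; the proofs are below) =====
def Claim_equal_is_similar_domain_py : Prop := ∀ (domain1 : String) (domain2 : String), Dom_is_similar_domain_py domain1 domain2 → Spec_is_similar_domain_py domain1 domain2 (is_similar_domain_py domain1 domain2)

-- ===== LEMMAS AND PROOFS =====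

theorem replace_go_single (x y : Char) :
    ∀ (fuel : Nat) (l acc : List Char), l.length ≤ fuel →
      PySem.Chars.replace.go [x] [y] fuel l acc
        = acc.reverse ++ l.map (fun c => if c == x then y else c) := by
  intro fuel
  induction fuel with
  | zero =>
    intro l acc h
    have : l = [] := List.length_eq_zero_iff.mp (Nat.le_zero.mp h)
    subst this
    simp [PySem.Chars.replace.go]
  | succ n ih =>
    intro l acc h
    cases l with
    | nil => simp [PySem.Chars.replace.go]
    | cons c t =>
      rw [PySem.Chars.replace.go]
      by_cases hc : x = c
      · subst hc
        simp [ih t (y :: acc) (by simpa using h)]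
      · have hbe : (x == c) = false := by simp [hc]
        simp [List.isPrefixOf, hbe, ih t (c :: acc) (by simpa using h), Ne.symm hc]

theorem replace_single (x y : Char) (l : List Char) :
    PySem.Chars.replace l [x] [y] = l.map (fun c => if c == x then y else c) := by
  rw [PySem.Chars.replace]
  simp [replace_go_single x y l.length l [] le_rfl]

theorem map_eq_iff_zip (f : Char → Char) :
    ∀ (l1 l2 : List Char),
      (l1.map f = l2) ↔ (l1.length = l2.length ∧ ((l1.zip l2).all (fun cd => cd.2 == f cd.1)) = true) := by
  intro l1
  induction l1 with
  | nil =>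
    intro l2; cases l2 <;> simp
  | cons c t ih =>
    intro l2
    cases l2 with
    | nil => simp
    | cons d r =>
      simp only [List.map_cons, List.cons.injEq, List.length_cons, List.zip_cons_cons,
        List.all_cons, Bool.and_eq_true, beq_iff_eq, add_left_inj, ih r]
      tauto

theorem subEq (x y : Char) (d1 d2 : List Char) :
    (PySem.Chars.replace d1 [x] [y] == d2) = ((d1.length == d2.length) && pvSubMatch x y d1 d2) := by
  rw [Bool.eq_iff_iff]
  simp only [beq_iff_eq, Bool.and_eq_true, replace_single, pvSubMatch]
  exact map_eq_iff_zip _ d1 d2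

theorem delOne_true (l1 : List Char) :
    ∀ (l2 : List Char), l1.length = l2.length →
      (pvDelOne true l1 l2 = true ↔ l1 = l2) := by
  induction l1 with
  | nil =>
    intro l2 h
    have : l2 = [] := List.length_eq_zero_iff.mp h.symm
    subst this; simp [pvDelOne]
  | cons c t ih =>
    intro l2 h
    cases l2 with
    | nil => simp at h
    | cons d r =>
      by_cases hc : c = d
      · subst hc
        simp only [pvDelOne, beq_self_eq_true, if_true, List.tail_cons]
        simp only [List.length_cons, add_left_inj] at h
        simp [ih r h]
      · simp [pvDelOne, hc]

theorem delOne_false (l1 : List Char) :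
    ∀ (l2 : List Char), l1.length = l2.length + 1 →
      (pvDelOne false l1 l2 = true ↔ ∃ i, i < l1.length ∧ l1.take i ++ l1.drop (i + 1) = l2) := by
  induction l1 with
  | nil => intro l2 h; simp at h
  | cons c t ih =>
    intro l2 h
    cases l2 with
    | nil =>
      have ht : t = [] := List.length_eq_zero_iff.mp (by simpa using h)
      subst ht
      simp [pvDelOne]
    | cons d r =>
      simp only [List.length_cons, add_left_inj] at h
      by_cases hc : c = d
      · subst hc
        simp only [pvDelOne, beq_self_eq_true, if_true, List.tail_cons]
        rw [ih r h]
        constructor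
        · rintro ⟨i, hi, he⟩
          exact ⟨i + 1, by simpa using Nat.succ_lt_succ hi, by simp [he]⟩
        · rintro ⟨i, hi, he⟩
          cases i with
          | zero =>
            simp at he
            subst he
            exact ⟨0, by simp, by simp⟩
          | succ j =>
            refine ⟨j, by simpa using hi, ?_⟩
            simpa using he
      · have hbe : (c == d) = false := by simp [hc]
        simp only [pvDelOne, hbe, Bool.false_eq_true, if_false, Bool.not_false, if_true]
        rw [delOne_true t (d :: r) (by simpa using h)]
        constructor
        · intro he; exact ⟨0, by simp, by simpa using he⟩
        · rintro ⟨i, hi, he⟩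
          cases i with
          | zero => simpa using he
          | succ j =>
            exfalso
            apply hc
            have := congrArg (fun l => l.head?) he
            simpa using this

theorem core_eq (d1 d2 : List Char) :
    (if pvSubsA.any (fun p =>
        PySem.Chars.replace d1 [p.1] [p.2] == d2 || PySem.Chars.replace d1 [p.2] [p.1] == d2) then
      true
    else if d1.length == d2.length + 1 then
      (List.range d1.length).any (fun i =>
        PySem.Chars.slice d1 none (some (i : Int)) ++ PySem.Chars.slice d1 (some ((i : Int) + 1)) none == d2)
    else
      false)
    =
    (if d1.length == d2.length then
      pvSubsA.any (fun p => pvSubMatch p.1 p.2 d1 d2 || pvSubMatch p.2 p.1 d1 d2)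
    else if d1.length == d2.length + 1 then
      pvDelOne false d1 d2
    else
      false) := by
  have hsub : ∀ p : Char × Char,
      (PySem.Chars.replace d1 [p.1] [p.2] == d2 || PySem.Chars.replace d1 [p.2] [p.1] == d2)
      = ((d1.length == d2.length) && (pvSubMatch p.1 p.2 d1 d2 || pvSubMatch p.2 p.1 d1 d2)) := by
    intro p
    rw [subEq, subEq, Bool.and_or_distrib_left]
  by_cases hl : d1.length = d2.length
  · have h2 : (d1.length == d2.length) = true := by simp [hl]
    have h3 : (d1.length == d2.length + 1) = false := by simp; omega
    simp only [hsub, h2, Bool.true_and, h3, Bool.false_eq_true, if_false, if_true]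
    cases hany : pvSubsA.any (fun p => pvSubMatch p.1 p.2 d1 d2 || pvSubMatch p.2 p.1 d1 d2) <;>
      simp
  · have h2 : (d1.length == d2.length) = false := by simp [hl]
    have hfalse : (pvSubsA.any (fun p =>
        PySem.Chars.replace d1 [p.1] [p.2] == d2 || PySem.Chars.replace d1 [p.2] [p.1] == d2)) = false := by
      simp only [hsub, h2, Bool.false_and]
      simp
    rw [hfalse, h2]
    simp only [Bool.false_eq_true, if_false]
    by_cases hl1 : d1.length = d2.length + 1
    · have h3 : (d1.length == d2.length + 1) = true := by simp [hl1]
      rw [h3]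
      simp only [if_true]
      have key : ∀ i : Nat,
          (PySem.Chars.slice d1 none (some (i : Int)) ++ PySem.Chars.slice d1 (some ((i : Int) + 1)) none)
            = d1.take i ++ d1.drop (i + 1) := by
        intro i
        rw [show ((i : Int) + 1) = (((i + 1 : Nat)) : Int) by push_cast; ring]
        rw [PySem.Chars.slice_eq_listSlice, PySem.Chars.slice_eq_listSlice,
          PySem.List.slice_to_natCast, PySem.List.slice_from_natCast]
      rw [Bool.eq_iff_iff, List.any_eq_true, delOne_false d1 d2 hl1]
      constructor
      · rintro ⟨i, hi, he⟩
        rw [List.mem_range] at hi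
        rw [key i, beq_iff_eq] at he
        exact ⟨i, hi, he⟩
      · rintro ⟨i, hi, he⟩
        refine ⟨i, List.mem_range.mpr hi, ?_⟩
        rw [key i, beq_iff_eq]
        exact he
    · have h3 : (d1.length == d2.length + 1) = false := by simp [hl1]
      rw [h3]
      simp

-- ===== VERDICT (by name: the statement is the Claim_ definition above) =====
theorem is_similar_domain_py_spec : Claim_equal_is_similar_domain_py := by
  intro domain1 domain2 _
  show is_similar_domain_py domain1 domain2 = is_similar_domain_py_alt domain1 domain2
  unfold is_similar_domain_py is_similar_domain_py_alt
  exact core_eq _ _
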